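-- pv_equiv track=rewrite | github.com/phildavis17/Advent_Of_Code | 2020/AoC_2020_3.py | generate_slope_points
-- ===== SOURCE A (Python) =====
-- def generate_slope_points(field, start_pos ,slope):
--     point_list = [start_pos]
--     (x, y) = start_pos
--     (step_x, step_y) = slope
--     wrap = len(field[0])
--
--     while point_list[-1][1] < len(field):
--         (x, y) = point_list[-1]
--         next_x = (x + step_x) % wrap
--         next_y = y + step_y
--         point_list.append((next_x, next_y))
--         x, y = next_x, next_y
--
--     return(point_list)
-- ===== SOURCE B (Python) =====
-- def generate_slope_points(field, start_pos, slope):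
--     (x, y) = start_pos
--     (step_x, step_y) = slope
--     height = len(field)
--     wrap = len(field[0])
--     if y >= height:
--         return [start_pos]
--     # number of steps the walk takes: smallest n >= 1 with y + n*step_y >= height (integer ceil)
--     n = -(-(height - y) // step_y)
--     return [start_pos] + [((x + i * step_x) % wrap, y + i * step_y)
--                           for i in range(1, n + 1)]
-- ===== Notes on version B (the rewrite author's own statement) =====
-- stated objective: alternative
-- what changed: Replaces the stateful while loop that steps off point_list[-1] with a closed-form point count (integer ceiling) and a comprehension deriving each point directly from its index.
import Mathlib
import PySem

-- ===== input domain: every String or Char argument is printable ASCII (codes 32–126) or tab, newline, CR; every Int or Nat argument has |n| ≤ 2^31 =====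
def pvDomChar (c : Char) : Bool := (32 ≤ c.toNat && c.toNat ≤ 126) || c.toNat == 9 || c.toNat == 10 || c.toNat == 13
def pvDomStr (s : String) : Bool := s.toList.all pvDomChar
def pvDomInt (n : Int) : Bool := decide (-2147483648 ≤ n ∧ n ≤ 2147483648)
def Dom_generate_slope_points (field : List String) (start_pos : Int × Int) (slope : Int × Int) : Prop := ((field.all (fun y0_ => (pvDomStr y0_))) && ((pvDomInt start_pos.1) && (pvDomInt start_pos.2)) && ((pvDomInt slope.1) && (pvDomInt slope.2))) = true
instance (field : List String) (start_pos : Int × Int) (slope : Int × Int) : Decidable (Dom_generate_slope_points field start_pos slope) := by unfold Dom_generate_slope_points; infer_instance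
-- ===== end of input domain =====

-- B replaces A's stateful while loop (stepping off point_list[-1]) with a closed-form
-- point count and an index-based comprehension; objective: alternative decomposition.

-- ===== PORT A =====
-- while point_list[-1][1] < len(field): append ((x+step_x)%wrap, y+step_y)
-- the '0 < step_y' conjunct is a totality guard only (Python loops forever otherwise;
-- such inputs are outside Pre_); the rest is A's loop step for step.
def pvLoopA (h wrap step_x step_y : Int) (acc : List (Int × Int)) (last : Int × Int) : List (Int × Int) :=
  if _hc : last.2 < h ∧ 0 < step_y then
    let next_x := PySem.Int.mod (last.1 + step_x) wrap
    let next_y := last.2 + step_y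
    pvLoopA h wrap step_x step_y (acc ++ [(next_x, next_y)]) (next_x, next_y)
  else acc
termination_by (h - last.2).toNat
decreasing_by omega

def generate_slope_points (field : List String) (start_pos : Int × Int) (slope : Int × Int) : List (Int × Int) :=
  let wrap := PySem.Str.len ((PySem.List.pyGet? field 0).getD "")   -- len(field[0]); IndexError on [] is excluded by Pre_
  pvLoopA (PySem.List.len field) wrap slope.1 slope.2 [start_pos] start_pos

-- ===== PORT B =====
def generate_slope_points_alt (field : List String) (start_pos : Int × Int) (slope : Int × Int) : List (Int × Int) :=
  let height := PySem.List.len field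
  let wrap := PySem.Str.len ((PySem.List.pyGet? field 0).getD "")
  if height ≤ start_pos.2 then [start_pos]
  else
    let n := -(PySem.Int.floordiv (-(height - start_pos.2)) slope.2)
    [start_pos] ++ (PySem.List.pyRange 1 (n + 1) 1).map
      (fun i => (PySem.Int.mod (start_pos.1 + i * slope.1) wrap, start_pos.2 + i * slope.2))

-- ===== PRECONDITION & SPEC =====
-- Pre_ excludes exactly the inputs where A does not return normally: empty field (IndexError
-- on field[0]); and, when the loop runs (start_y < height), a non-positive step_y (infinite
-- loop) or an empty first row (ZeroDivisionError on % 0).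
def Pre_generate_slope_points (field : List String) (start_pos : Int × Int) (slope : Int × Int) : Prop :=
  field ≠ [] ∧ (PySem.List.len field ≤ start_pos.2 ∨
    (0 < slope.2 ∧ 0 < PySem.Str.len ((PySem.List.pyGet? field 0).getD "")))
instance (field : List String) (start_pos : Int × Int) (slope : Int × Int) : Decidable (Pre_generate_slope_points field start_pos slope) := by unfold Pre_generate_slope_points; infer_instance

def pvWitness_generate_slope_points : List String × (Int × Int) × (Int × Int) := (["..#", ".#.", "#.."], (0, 0), (3, 1))

def Spec_generate_slope_points (field : List String) (start_pos : Int × Int) (slope : Int × Int) (out : List (Int × Int)) : Prop := out = generate_slope_points_alt field start_pos slope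
instance (field : List String) (start_pos : Int × Int) (slope : Int × Int) (out : List (Int × Int)) : Decidable (Spec_generate_slope_points field start_pos slope out) := by unfold Spec_generate_slope_points; infer_instance

-- ===== CLAIM (what is proved, stated in full; the proofs are below) =====
def Claim_equal_generate_slope_points : Prop := ∀ (field : List String) (start_pos : Int × Int) (slope : Int × Int), Dom_generate_slope_points field start_pos slope → Pre_generate_slope_points field start_pos slope → Spec_generate_slope_points field start_pos slope (generate_slope_points field start_pos slope)

-- ===== LEMMAS AND PROOFS =====

-- (a % w + b) % w = (a + b) % w for Python mod with positive divisor
lemma pv_mod_add_mod (a b w : Int) (hw : 0 < w) :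
    PySem.Int.mod (PySem.Int.mod a w + b) w = PySem.Int.mod (a + b) w := by
  simp only [PySem.Int.mod_eq_emod_of_pos hw]
  conv_rhs => rw [Int.add_emod]
  rw [Int.add_emod (a % w) b]
  simp [Int.emod_emod_of_dvd]

-- closed form of A's loop
lemma pvLoopA_closed (h w sx sy : Int) (hsy : 0 < sy) (hw : 0 < w) :
    ∀ (g : Nat) (x y : Int) (acc : List (Int × Int)), (h - y).toNat ≤ g →
    pvLoopA h w sx sy acc (x, y) =
      acc ++ (PySem.List.pyRange 1 (-(PySem.Int.floordiv (-(h - y)) sy) + 1) 1).map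
        (fun i => (PySem.Int.mod (x + i * sx) w, y + i * sy)) := by
  intro g
  induction g with
  | zero =>
    intro x y acc hg
    have hy : h ≤ y := by omega
    rw [pvLoopA.eq_def]
    have hq : -(PySem.Int.floordiv (-(h - y)) sy) ≤ 0 := by
      set q := -(PySem.Int.floordiv (-(h - y)) sy) with hqdef
      have := (PySem.Int.neg_floordiv_neg_eq_iff_of_pos (a := h - y) (b := sy) (q := q) hsy).mp rfl
      nlinarith [this.1, this.2]
    rw [PySem.List.pyRange_one_eq_nil (by omega)]
    simp [show ¬ (y < h ∧ 0 < sy) from fun hc => absurd hc.1 (by omega)]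
  | succ g ih =>
    intro x y acc hg
    by_cases hy : y < h
    · set q := -(PySem.Int.floordiv (-(h - y)) sy) with hqdef
      have hb := (PySem.Int.neg_floordiv_neg_eq_iff_of_pos (a := h - y) (b := sy) (q := q) hsy).mp rfl
      have hq1 : 1 ≤ q := by nlinarith [hb.1, hb.2]
      rw [pvLoopA.eq_def]
      simp only [dif_pos (show (x, y).2 < h ∧ 0 < sy from ⟨hy, hsy⟩)]
      have hrec := ih (PySem.Int.mod (x + sx) w) (y + sy)
        (acc ++ [(PySem.Int.mod (x + sx) w, y + sy)]) (by omega)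
      rw [hrec]
      -- the remaining count is q - 1
      have hq' : -(PySem.Int.floordiv (-(h - (y + sy))) sy) = q - 1 := by
        rw [PySem.Int.neg_floordiv_neg_eq_iff_of_pos hsy]
        constructor <;> nlinarith [hb.1, hb.2]
      rw [hq']
      -- reindex the tail: range 1..(q-1) over (x+sx)%w  =  range 2..q over x
      have htail : (PySem.List.pyRange 1 (q - 1 + 1) 1).map
            (fun i => (PySem.Int.mod (PySem.Int.mod (x + sx) w + i * sx) w, y + sy + i * sy))
          = (PySem.List.pyRange 2 (q + 1) 1).map
            (fun i => (PySem.Int.mod (x + i * sx) w, y + i * sy)) := by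
        rw [PySem.List.pyRange_one (a := 1) (b := q - 1 + 1),
            PySem.List.pyRange_one (a := 2) (b := q + 1)]
        rw [show (q + 1 - 2).toNat = (q - 1 + 1 - 1).toNat by omega]
        rw [List.map_map, List.map_map]
        refine List.map_congr_left ?_
        intro k _
        simp only [Function.comp_apply, Prod.mk.injEq]
        refine ⟨?_, by ring⟩
        rw [pv_mod_add_mod _ _ _ hw]
        congr 1
        ring
      rw [htail, PySem.List.pyRange_one_cons (a := 1) (b := q + 1) (by omega)]
      simp
    · rw [pvLoopA.eq_def]
      have hq : -(PySem.Int.floordiv (-(h - y)) sy) ≤ 0 := by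
        set q := -(PySem.Int.floordiv (-(h - y)) sy) with hqdef
        have := (PySem.Int.neg_floordiv_neg_eq_iff_of_pos (a := h - y) (b := sy) (q := q) hsy).mp rfl
        nlinarith [this.1, this.2]
      rw [PySem.List.pyRange_one_eq_nil (by omega)]
      simp [show ¬ ((x, y).2 < h ∧ 0 < sy) from fun hc => absurd hc.1 (by omega)]

-- ===== VERDICT (by name: the statement is the Claim_ definition above) =====
theorem generate_slope_points_spec : Claim_equal_generate_slope_points := by
  intro field start_pos slope _hdom hpre
  obtain ⟨x0, y0⟩ := start_pos
  obtain ⟨sx, sy⟩ := slope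
  obtain ⟨hne, hrest⟩ := hpre
  unfold Spec_generate_slope_points
  simp only [generate_slope_points, generate_slope_points_alt]
  by_cases hy : PySem.List.len field ≤ y0
  · have h1 : ¬ ((((x0, y0) : Int × Int)).2 < PySem.List.len field ∧ 0 < sy) :=
      fun hc => absurd hc.1 (not_lt.mpr hy)
    rw [pvLoopA.eq_def]
    simp only [dif_neg h1, if_pos hy]
  · have h2 : 0 < sy ∧ 0 < PySem.Str.len ((PySem.List.pyGet? field 0).getD "") := by
      rcases hrest with h | h
      · exact absurd h hy
      · exact h
    rw [if_neg hy,
        pvLoopA_closed _ _ _ _ h2.1 h2.2 (PySem.List.len field - y0).toNat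
          x0 y0 [((x0 : Int), (y0 : Int))] (le_refl _)]
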